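-- pv_equiv track=rewrite | github.com/ironartisan/chess | dots_and_boxes/core/AIPlayer/algorithm.py | _num2move
-- ===== SOURCE A (Python) =====
-- def _num2move(value):
--     y, x = -1, -1
--     if (value & (1 << 31)) != 0:
--         type = "h"
--     else:
--         type = "v"
--     for i in range(5)[::1]:
--         for j in range(6)[::1]:
--             if (value & 1) == 1:
--                 if type == "h":
--                     y, x = j, i
--                 else:
--                     y, x = i, j
--                 break
--             value >>= 1
--         if y != -1:
--             break
--
--     if type == "h":
--         y = str(6 - y)
--         x = "abcde"[x]
--     else:
--         y = str(5 - y)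
--         x = "abcdef"[x]
--     return (x, y, type)
-- ===== SOURCE B (Python) =====
-- def _num2move(value):
--     type = "h" if (value & (1 << 31)) != 0 else "v"
--     low = value % (1 << 30)  # bits 0..29 (== value & 0x3FFFFFFF for every int)
--     if low:
--         idx = (low ^ (low - 1)).bit_length() - 1  # index of the lowest set bit, 0..29
--         i, j = divmod(idx, 6)
--     else:
--         i, j = -1, -1  # no move bit set: the scan's fall-through state
--     if type == "h":
--         return ("abcde"[i], str(6 - j), type)
--     else:
--         return ("abcdef"[j], str(5 - i), type)
-- ===== Notes on version B (the rewrite author's own statement) =====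
-- stated objective: simpler
-- what changed: A's nested 5x6 bit-scanning loops with break/sentinel state are replaced by a closed-form computation: mask the 30 move bits, take the lowest set bit index via the (low ^ (low-1)).bit_length()-1 trick, and split it with divmod(idx, 6).
import Mathlib
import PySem

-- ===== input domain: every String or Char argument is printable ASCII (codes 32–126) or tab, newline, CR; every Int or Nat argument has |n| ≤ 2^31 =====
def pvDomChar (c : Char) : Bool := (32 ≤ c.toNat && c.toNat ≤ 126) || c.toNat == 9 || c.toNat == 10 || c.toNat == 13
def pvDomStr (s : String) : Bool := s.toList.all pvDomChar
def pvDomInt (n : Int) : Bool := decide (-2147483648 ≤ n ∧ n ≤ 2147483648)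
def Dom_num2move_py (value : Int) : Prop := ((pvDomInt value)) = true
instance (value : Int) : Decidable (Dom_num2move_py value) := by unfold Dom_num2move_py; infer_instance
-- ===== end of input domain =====

-- B replaces A's nested 5×6 bit-scan loops by a closed-form lowest-set-bit computation
-- (xor bit trick + divmod); objective: simpler. The agreement holds for every Int.

-- ===== PORT A =====

-- inner `for j in range(6)[::1]: ...` with its break; state (y, x, value), returned as a triple
def pvInnerA (ty : String) (i : Int) : List Int → Int → Int → Int → Int × Int × Int
  | [], y, x, v => (y, x, v)
  | j :: js, y, x, v =>
    if PySem.Int.band v 1 == 1 then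
      (if ty == "h" then (j, i, v) else (i, j, v))
    else pvInnerA ty i js y x (v >>> (1:Nat))

-- outer `for i in range(5)[::1]: ...` with `if y != -1: break`
def pvOuterA (ty : String) : List Int → Int → Int → Int → Int × Int
  | [], y, x, _ => (y, x)
  | i :: is, y, x, v =>
    let r := pvInnerA ty i ((PySem.List.slice? (PySem.List.pyRange 0 6) none none 1).getD []) y x v
    if r.1 != -1 then (r.1, r.2.1) else pvOuterA ty is r.1 r.2.1 r.2.2

def num2move_py (value : Int) : String × String × String :=
  let ty := if PySem.Int.band value (1 <<< 31) != 0 then "h" else "v"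
  let yx := pvOuterA ty ((PySem.List.slice? (PySem.List.pyRange 0 5) none none 1).getD []) (-1) (-1) value
  if ty == "h" then
    -- "abcde"[x] with x ∈ {-1, 0..4}: always in range, so the IndexError default never fires — exact
    (String.ofList [(PySem.Str.pyGet? "abcde" yx.2).getD 'a'], PySem.Int.toStr (6 - yx.1), ty)
  else
    -- "abcdef"[x] with x ∈ {-1, 0..5}: always in range — exact
    (String.ofList [(PySem.Str.pyGet? "abcdef" yx.2).getD 'a'], PySem.Int.toStr (5 - yx.1), ty)

-- ===== PORT B =====

def num2move_py_alt (value : Int) : String × String × String :=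
  let ty := if PySem.Int.band value (1 <<< 31) != 0 then "h" else "v"
  let low := PySem.Int.mod value (1 <<< 30)
  let ij : Int × Int :=
    if low != 0 then
      let idx : Int := (PySem.Int.bitLength (PySem.Int.bxor low (low - 1)) : Int) - 1
      (PySem.Int.floordiv idx 6, PySem.Int.mod idx 6)
    else (-1, -1)
  if ty == "h" then
    -- "abcde"[i] with i ∈ {-1, 0..4}: always in range — exact
    (String.ofList [(PySem.Str.pyGet? "abcde" ij.1).getD 'a'], PySem.Int.toStr (6 - ij.2), ty)
  else
    -- "abcdef"[j] with j ∈ {-1, 0..5}: always in range — exact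
    (String.ofList [(PySem.Str.pyGet? "abcdef" ij.2).getD 'a'], PySem.Int.toStr (5 - ij.1), ty)

-- ===== PRECONDITION & SPEC =====
def Spec_num2move_py (value : Int) (out : String × String × String) : Prop := out = num2move_py_alt value
instance (value : Int) (out : String × String × String) : Decidable (Spec_num2move_py value out) := by unfold Spec_num2move_py; infer_instance

-- ===== CLAIM (what is proved, stated in full; the proofs are below) =====
def Claim_equal_num2move_py : Prop := ∀ (value : Int), Dom_num2move_py value → Spec_num2move_py value (num2move_py value)

-- ===== LEMMAS AND PROOFS =====

-- trailing-zero count (index of the lowest set bit; 0 on 0)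
def pvTz (n : Nat) : Nat :=
  if h : n = 0 ∨ n % 2 = 1 then 0 else pvTz (n / 2) + 1
decreasing_by exact Nat.div_lt_self (by omega) (by omega)

lemma pvTz_odd {n : Nat} (h : n % 2 = 1) : pvTz n = 0 := by
  rw [pvTz]; simp [h]

lemma pvTz_even {n : Nat} (h0 : n ≠ 0) (h : n % 2 = 0) : pvTz n = pvTz (n / 2) + 1 := by
  rw [pvTz]; simp [h0, h]

lemma pvTz_lt {n : Nat} (L : Nat) (h0 : n ≠ 0) (h : n < 2 ^ L) : pvTz n < L := by
  induction L generalizing n with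
  | zero => omega
  | succ L ih =>
    rcases Nat.mod_two_eq_zero_or_one n with he | ho
    · rw [pvTz_even h0 he]
      have := ih (n := n / 2) (by omega) (by rw [pow_succ] at h; omega)
      omega
    · rw [pvTz_odd ho]; omega

lemma pvTz_mod {n : Nat} (a : Nat) (h : n % 2 ^ a ≠ 0) : pvTz n = pvTz (n % 2 ^ a) := by
  induction a generalizing n with
  | zero => omega
  | succ a ih =>
    have hn0 : n ≠ 0 := by rintro rfl; simp at h
    have hpar : n % 2 ^ (a + 1) % 2 = n % 2 :=
      Nat.mod_mod_of_dvd n (dvd_pow_self 2 (Nat.succ_ne_zero a))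
    have hdiv : n % 2 ^ (a + 1) / 2 = n / 2 % 2 ^ a := by
      rw [pow_succ']
      exact Nat.mod_mul_right_div_self n 2 (2 ^ a)
    rcases Nat.mod_two_eq_zero_or_one n with he | ho
    · have hm0 : n % 2 ^ (a + 1) ≠ 0 := h
      rw [pvTz_even hn0 he, pvTz_even hm0 (by omega), hdiv]
      have hrec : n / 2 % 2 ^ a ≠ 0 := by
        intro hz
        apply hm0
        omega
      rw [ih hrec]
    · rw [pvTz_odd ho, pvTz_odd (by omega)]

lemma pvTz_pow_mul {n : Nat} (a : Nat) (h0 : n ≠ 0) : pvTz (2 ^ a * n) = a + pvTz n := by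
  induction a with
  | zero => simp
  | succ a ih =>
    have : 2 ^ (a + 1) * n = 2 * (2 ^ a * n) := by ring
    rw [this, pvTz_even (by positivity) (by omega)]
    rw [Nat.mul_div_cancel_left _ (by norm_num), ih]
    omega

-- the xor bit trick: n ^ (n - 1) is the all-ones mask up to and including the lowest set bit
lemma pvXor_pred {n : Nat} (h0 : n ≠ 0) : n ^^^ (n - 1) = 2 ^ (pvTz n + 1) - 1 := by
  induction n using Nat.strong_induction_on with
  | _ n ih =>
    rcases Nat.mod_two_eq_zero_or_one n with he | ho
    · have hhalf : n / 2 ≠ 0 := by omega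
      have hx2 : (n ^^^ (n - 1)) / 2 = (n / 2) ^^^ (n / 2 - 1) := by
        rw [Nat.xor_div_two]
        congr 1
        omega
      have hx1 : (n ^^^ (n - 1)) % 2 = 1 := by
        rw [Nat.xor_mod_two_eq]
        omega
      have hrec := ih (n / 2) (by omega) hhalf
      rw [pvTz_even h0 he]
      have hp : 0 < 2 ^ (pvTz (n / 2) + 1) := by positivity
      rw [pow_succ]
      omega
    · have hx : n ^^^ (n - 1) = 1 := by
        have h2 : (n ^^^ (n - 1)) / 2 = 0 := by
          rw [Nat.xor_div_two]
          have : n - 1 = n / 2 * 2 := by omega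
          simp [this]
        have h1 : (n ^^^ (n - 1)) % 2 = 1 := by
          rw [Nat.xor_mod_two_eq]; omega
        omega
      rw [hx, pvTz_odd ho]; rfl

lemma pvBitLength_ones (k : Nat) : PySem.Int.bitLength ((2 ^ (k + 1) - 1 : Nat) : Int) = k + 1 := by
  induction k with
  | zero => decide
  | succ k ih =>
    rw [PySem.Int.bitLength_natCast (Nat.sub_pos_of_lt (Nat.one_lt_two_pow_iff.mpr (by omega)))]
    have : (2 ^ (k + 1 + 1) - 1) / 2 = 2 ^ (k + 1) - 1 := by
      rw [pow_succ]
      omega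
    rw [this, ih]

-- low-bits decomposition of the floor remainder under a right shift
lemma pvEmodSplit (v : Int) (a b : Nat) :
    v % (2 : Int) ^ (a + b) = 2 ^ a * ((v >>> a) % 2 ^ b) + v % 2 ^ a := by
  have h1 : v >>> a = v / 2 ^ a := by rw [Int.shiftRight_eq_div_pow]; push_cast; ring
  rw [h1, pow_add, Int.emod_def (b := 2 ^ a * 2 ^ b), Int.emod_def, Int.emod_def]
  have : v / (2 ^ a * 2 ^ b) = v / 2 ^ a / 2 ^ b :=
    (Int.ediv_ediv_of_nonneg (by positivity)).symm
  rw [this]; ring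

-- characterisation of A's inner loop: it returns the lowest set bit among the first
-- js.length bits of v (hit: position read off js), or falls through with v shifted out
lemma pvInnerA_spec (ty : String) (i y x : Int) (js : List Int) (v : Int) :
    pvInnerA ty i js y x v =
      if (v % (2 : Int) ^ js.length).toNat = 0 then (y, x, v >>> js.length)
      else
        let k := pvTz (v % (2 : Int) ^ js.length).toNat
        if ty == "h" then (js.getD k 0, i, v >>> k) else (i, js.getD k 0, v >>> k) := by
  induction js generalizing v with
  | nil => simp [pvInnerA, Int.shiftRight_zero]
  | cons j js ih =>
    have hb : (PySem.Int.band v 1 == 1) = decide (v % 2 = 1) := by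
      rw [PySem.Int.band_one, PySem.Int.mod_eq_emod_of_pos (by norm_num)]; rfl
    have hsplit : v % 2 ^ (js.length + 1) = 2 * ((v >>> (1:Nat)) % 2 ^ js.length) + v % 2 := by
      have := pvEmodSplit v 1 js.length
      rw [Nat.add_comm 1 js.length] at this
      simpa using this
    have hge : (0:Int) ≤ (v >>> (1:Nat)) % 2 ^ js.length := Int.emod_nonneg _ (by positivity)
    have hlt : (v >>> (1:Nat)) % 2 ^ js.length < 2 ^ js.length := Int.emod_lt_of_pos _ (by positivity)
    have hge2 : (0:Int) ≤ v % 2 ^ (js.length + 1) := Int.emod_nonneg _ (by positivity)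
    have h2 : v % 2 = 0 ∨ v % 2 = 1 := Int.emod_two_eq_zero_or_one v
    have hsh : ∀ k : Nat, v >>> (1:Nat) >>> k = v >>> (k + 1) := fun k => by
      rw [← Int.shiftRight_add, Nat.add_comm]
    simp only [pvInnerA, hb]
    by_cases hv : v % 2 = 1
    · have hm1 : (v % (2:Int) ^ (js.length + 1)).toNat % 2 = 1 := by omega
      have hm0 : (v % (2:Int) ^ (js.length + 1)).toNat ≠ 0 := by omega
      simp only [hv, decide_true, if_true, List.length_cons, pvTz_odd hm1,
        List.getD_cons_zero, Int.shiftRight_zero]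
      simp [hm0]
    · have hv0 : v % 2 = 0 := by omega
      simp only [hv, decide_false, Bool.false_eq_true, if_false]
      rw [ih]
      have hmm : (v % (2:Int) ^ (js.length + 1)).toNat
          = 2 * ((v >>> (1:Nat)) % (2:Int) ^ js.length).toNat := by omega
      by_cases hz : ((v >>> (1:Nat)) % (2:Int) ^ js.length).toNat = 0
      · have hm0' : (v % (2:Int) ^ (js.length + 1)).toNat = 0 := by omega
        rw [if_pos hz, List.length_cons, if_pos hm0', hsh]
      · have hnz : (v % (2:Int) ^ (js.length + 1)).toNat ≠ 0 := by omega
        have htz : pvTz ((v % (2:Int) ^ (js.length + 1)).toNat)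
            = pvTz (((v >>> (1:Nat)) % (2:Int) ^ js.length).toNat) + 1 := by
          rw [pvTz_even hnz (by omega)]
          have : (v % (2:Int) ^ (js.length + 1)).toNat / 2
              = ((v >>> (1:Nat)) % (2:Int) ^ js.length).toNat := by omega
          rw [this]
        simp only [hz, if_false, List.length_cons, hnz, htz, List.getD_cons_succ, hsh]

lemma pvGetD6 (k : Nat) (h : k < 6) : ([0, 1, 2, 3, 4, 5] : List Int).getD k 0 = (k : Int) := by
  interval_cases k <;> norm_num

lemma pvGetD5 (k : Nat) (h : k < 5) : ([0, 1, 2, 3, 4] : List Int).getD k 0 = (k : Int) := by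
  interval_cases k <;> norm_num

-- characterisation of A's outer loop over any list of non-negative row indices
lemma pvOuterA_spec (ty : String) (is : List Int) (his : ∀ i ∈ is, 0 ≤ i) (v : Int) :
    pvOuterA ty is (-1) (-1) v =
      if (v % (2 : Int) ^ (6 * is.length)).toNat = 0 then (-1, -1)
      else
        let k := pvTz (v % (2 : Int) ^ (6 * is.length)).toNat
        if ty == "h" then (((k % 6 : Nat) : Int), is.getD (k / 6) 0)
        else (is.getD (k / 6) 0, ((k % 6 : Nat) : Int)) := by
  induction is generalizing v with
  | nil => simp [pvOuterA]
  | cons i is ih =>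
    have hR6 : (PySem.List.slice? (PySem.List.pyRange 0 6) none none 1).getD []
        = ([0, 1, 2, 3, 4, 5] : List Int) := by decide
    have hlen : 6 * (i :: is).length = 6 + 6 * is.length := by
      simp [List.length_cons]; ring
    have hL6 : ([0, 1, 2, 3, 4, 5] : List Int).length = 6 := rfl
    have hsp : v % (2:Int) ^ (6 + 6 * is.length)
        = 64 * ((v >>> (6:Nat)) % 2 ^ (6 * is.length)) + v % 64 := by
      have := pvEmodSplit v 6 (6 * is.length)
      norm_num at this
      exact this
    have hge6 : (0:Int) ≤ v % 64 := Int.emod_nonneg _ (by norm_num)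
    have hlt6 : v % 64 < 64 := Int.emod_lt_of_pos _ (by norm_num)
    have hge' : (0:Int) ≤ (v >>> (6:Nat)) % 2 ^ (6 * is.length) := Int.emod_nonneg _ (by positivity)
    have hgeL : (0:Int) ≤ v % 2 ^ (6 + 6 * is.length) := Int.emod_nonneg _ (by positivity)
    simp only [pvOuterA, hR6]
    rw [pvInnerA_spec, hL6]
    have h64 : (2:Int) ^ (6:Nat) = 64 := by norm_num
    rw [h64, hlen]
    by_cases h6 : (v % (64:Int)).toNat = 0
    · -- no hit in this row: fall through to the remaining rows with v >> 6
      rw [if_pos h6]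
      have hne : ((-1 : Int) != -1) = false := by decide
      simp only [hne, Bool.false_eq_true, if_false]
      rw [ih (fun i hi => his i (List.mem_cons_of_mem _ hi))]
      have hmm : (v % (2:Int) ^ (6 + 6 * is.length)).toNat
          = 64 * ((v >>> (6:Nat)) % (2:Int) ^ (6 * is.length)).toNat := by omega
      by_cases hz : ((v >>> (6:Nat)) % (2:Int) ^ (6 * is.length)).toNat = 0
      · rw [if_pos hz, if_pos (by omega)]
      · rw [if_neg hz, if_neg (by omega : ¬ (v % (2:Int) ^ (6 + 6 * is.length)).toNat = 0)]
        have htz : pvTz ((v % (2:Int) ^ (6 + 6 * is.length)).toNat)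
            = 6 + pvTz (((v >>> (6:Nat)) % (2:Int) ^ (6 * is.length)).toNat) := by
          have h26 : (64:Nat) = 2 ^ 6 := by norm_num
          rw [hmm, h26, pvTz_pow_mul 6 hz]
        simp only [htz]
        have hmod : (6 + pvTz (((v >>> (6:Nat)) % (2:Int) ^ (6 * is.length)).toNat)) % 6
            = pvTz (((v >>> (6:Nat)) % (2:Int) ^ (6 * is.length)).toNat) % 6 := by omega
        have hdiv : (6 + pvTz (((v >>> (6:Nat)) % (2:Int) ^ (6 * is.length)).toNat)) / 6
            = pvTz (((v >>> (6:Nat)) % (2:Int) ^ (6 * is.length)).toNat) / 6 + 1 := by omega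
        rw [hmod, hdiv, List.getD_cons_succ]
    · -- hit in this row: the scan stops here
      rw [if_neg h6]
      have hk6 : pvTz ((v % (64:Int)).toNat) < 6 := by
        apply pvTz_lt 6 h6
        omega
      have hmain0 : (v % (2:Int) ^ (6 + 6 * is.length)).toNat % 64
          = (v % (64:Int)).toNat := by omega
      have hmainne : (v % (2:Int) ^ (6 + 6 * is.length)).toNat ≠ 0 := by omega
      have htz : pvTz ((v % (2:Int) ^ (6 + 6 * is.length)).toNat)
          = pvTz ((v % (64:Int)).toNat) := by
        have h26 : (2:Nat) ^ 6 = 64 := by norm_num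
        rw [pvTz_mod 6 (by rw [h26]; omega), h26, hmain0]
      rw [if_neg hmainne]
      simp only [htz]
      have hmod : pvTz ((v % (64:Int)).toNat) % 6
          = pvTz ((v % (64:Int)).toNat) := Nat.mod_eq_of_lt hk6
      have hdiv : pvTz ((v % (64:Int)).toNat) / 6 = 0 := Nat.div_eq_of_lt hk6
      rw [hmod, hdiv, List.getD_cons_zero, pvGetD6 _ hk6]
      by_cases hty : (ty == "h") = true
      · simp only [hty, if_true]
        have hb : (((pvTz ((v % (64:Int)).toNat) : Nat) : Int) != -1) = true := by
          simp only [bne_iff_ne, ne_eq]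
          omega
        simp [hb]
      · simp only [hty, Bool.false_eq_true, if_false]
        have hipos : (0:Int) ≤ i := his i List.mem_cons_self
        have hb : ((i : Int) != -1) = true := by
          simp only [bne_iff_ne, ne_eq]
          omega
        simp [hb]

-- ===== VERDICT (by name: the statement is the Claim_ definition above) =====
theorem num2move_py_spec : Claim_equal_num2move_py := by
  intro value _
  unfold Spec_num2move_py num2move_py num2move_py_alt
  dsimp only
  have hR5 : (PySem.List.slice? (PySem.List.pyRange 0 5) none none 1).getD []
      = ([0, 1, 2, 3, 4] : List Int) := by decide
  have hmod : PySem.Int.mod value (1 <<< 30) = value % 2 ^ (30:Nat) := by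
    have h30 : ((1 <<< 30 : Int)) = 2 ^ (30:Nat) := by decide
    rw [h30, PySem.Int.mod_eq_emod_of_pos (by positivity)]
  have hge : (0:Int) ≤ value % 2 ^ (30:Nat) := Int.emod_nonneg _ (by positivity)
  have hlt : value % 2 ^ (30:Nat) < 2 ^ (30:Nat) := Int.emod_lt_of_pos _ (by positivity)
  rw [hR5, pvOuterA_spec _ _ (by decide), hmod]
  have hlen : 6 * ([0, 1, 2, 3, 4] : List Int).length = 30 := by decide
  rw [hlen]
  by_cases hz : (value % (2:Int) ^ (30:Nat)).toNat = 0
  · have hz' : (value % 2 ^ (30:Nat) != 0) = false := by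
      rw [bne_eq_false_iff_eq]
      omega
    rw [if_pos hz, hz']
    by_cases hb : PySem.Int.band value 2147483648 = 0 <;> simp [hb]
  · have hz' : (value % 2 ^ (30:Nat) != 0) = true := by
      simp only [bne_iff_ne, ne_eq]
      omega
    rw [if_neg hz, hz']
    simp only [if_true]
    set n : Nat := (value % (2:Int) ^ (30:Nat)).toNat with hn
    have hvn : value % (2:Int) ^ (30:Nat) = (n : Int) := by omega
    have hk : pvTz n < 30 := pvTz_lt 30 hz (by omega)
    -- B's index computation produces exactly pvTz n
    have hsub : (n : Int) - 1 = ((n - 1 : Nat) : Int) := by omega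
    have hxor : PySem.Int.bxor (n : Int) ((n : Int) - 1)
        = ((2 ^ (pvTz n + 1) - 1 : Nat) : Int) := by
      rw [hsub, PySem.Int.bxor_natCast, pvXor_pred hz]
    have hbl : (PySem.Int.bitLength (PySem.Int.bxor (n : Int) ((n : Int) - 1)) : Int) - 1
        = ((pvTz n : Nat) : Int) := by
      rw [hxor, pvBitLength_ones]
      push_cast
      ring
    have hfd : PySem.Int.floordiv ((pvTz n : Nat) : Int) 6 = ((pvTz n / 6 : Nat) : Int) := by
      exact_mod_cast PySem.Int.floordiv_natCast (pvTz n) 6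
    have hmd : PySem.Int.mod ((pvTz n : Nat) : Int) 6 = ((pvTz n % 6 : Nat) : Int) := by
      exact_mod_cast PySem.Int.mod_natCast (pvTz n) 6
    rw [hvn, hbl, hfd, hmd, pvGetD5 _ (by omega)]
    by_cases hb : PySem.Int.band value 2147483648 = 0 <;> simp [hb]
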